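-- pv_equiv track=rewrite | github.com/mikeh-studio/nba-insights-engine-gcp | dags/nba_pipeline_triage.py | _status_for_stage
-- ===== SOURCE A (Python) =====
-- FAILED_STATES = {"failed", "upstream_failed"}
--
-- SUCCESS_STATES = {"success"}
--
-- SKIPPED_STATES = {"skipped"}
--
-- ACTIVE_STATES = {"queued", "scheduled", "running", "up_for_retry", "restarting"}
--
-- def _status_for_stage(states: list[str]) -> str:
--     normalized = [state for state in states if state]
--     if not normalized:
--         return "not_run"
--     if any(state in FAILED_STATES for state in normalized):
--         return "failed"
--     if any(state in ACTIVE_STATES for state in normalized):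
--         return "running"
--     if any(state in SUCCESS_STATES for state in normalized):
--         if all(state in SUCCESS_STATES | SKIPPED_STATES for state in normalized):
--             return "success"
--     if all(state in SKIPPED_STATES for state in normalized):
--         return "skipped"
--     return normalized[0]
-- ===== SOURCE B (Python) =====
-- FAILED_STATES = {"failed", "upstream_failed"}
-- SUCCESS_STATES = {"success"}
-- SKIPPED_STATES = {"skipped"}
-- ACTIVE_STATES = {"queued", "scheduled", "running", "up_for_retry", "restarting"}
--
-- # Severity lattice: each state maps to a rank; the stage status is decided by
-- # the MAXIMUM rank present (unknown states rank 2 and fall back to the first one).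
-- _SEVERITY = {
--     "skipped": 0,
--     "success": 1,
--     "queued": 3, "scheduled": 3, "running": 3, "up_for_retry": 3, "restarting": 3,
--     "failed": 4, "upstream_failed": 4,
-- }
--
-- def _status_for_stage(states: list[str]) -> str:
--     normalized = [state for state in states if state]
--     if not normalized:
--         return "not_run"
--     top = max(_SEVERITY.get(state, 2) for state in normalized)
--     return ("failed" if top == 4 else
--             "running" if top == 3 else
--             "success" if top == 1 else
--             "skipped" if top == 0 else
--             normalized[0])
-- ===== Notes on version B (the rewrite author's own statement) =====
-- stated objective: alternative
-- what changed: Replaces A's cascade of any/all membership scans with a severity lattice: each state is mapped through one rank table and the status is read off the maximum rank present (rank 2 = unknown state falls back to the first non-empty element).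
import Mathlib
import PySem

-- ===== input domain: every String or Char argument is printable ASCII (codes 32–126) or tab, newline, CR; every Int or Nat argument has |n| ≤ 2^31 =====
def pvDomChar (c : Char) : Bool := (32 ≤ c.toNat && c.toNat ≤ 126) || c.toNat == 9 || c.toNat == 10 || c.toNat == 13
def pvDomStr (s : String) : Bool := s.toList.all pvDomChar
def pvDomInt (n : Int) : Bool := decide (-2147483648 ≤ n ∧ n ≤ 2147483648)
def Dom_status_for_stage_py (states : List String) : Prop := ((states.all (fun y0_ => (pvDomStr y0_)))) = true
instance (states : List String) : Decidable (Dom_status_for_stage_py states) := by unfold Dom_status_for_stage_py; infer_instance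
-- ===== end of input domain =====

-- B replaces A's prioritized any/all membership scans by a severity-lattice reduction:
-- each state is mapped to an integer rank and the status is decided solely from the
-- maximum rank present; objective: alternative algorithm, same O(n) cost.

-- ===== PORT A =====
def pvFailedStates : List String := ["failed", "upstream_failed"]
def pvActiveStates : List String := ["queued", "scheduled", "running", "up_for_retry", "restarting"]

def status_for_stage_py (states : List String) : String :=
  let normalized := states.filter (fun s => s ≠ "")
  match normalized with
  | [] => "not_run"
  | first :: _ =>
    if normalized.any (fun s => pvFailedStates.contains s) then "failed"
    else if normalized.any (fun s => pvActiveStates.contains s) then "running"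
    else if normalized.any (fun s => s == "success")
            && normalized.all (fun s => s == "success" || s == "skipped") then "success"
    else if normalized.all (fun s => s == "skipped") then "skipped"
    else first

-- ===== PORT B =====
def pvSeverity : PySem.Dict String Int := PySem.Dict.mk
  [("skipped", 0), ("success", 1),
   ("queued", 3), ("scheduled", 3), ("running", 3), ("up_for_retry", 3), ("restarting", 3),
   ("failed", 4), ("upstream_failed", 4)]

def pvSev (s : String) : Int := pvSeverity.getD s 2

def status_for_stage_py_alt (states : List String) : String :=
  let normalized := states.filter (fun s => s ≠ "")
  match normalized with
  | [] => "not_run"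
  | first :: rest =>
    -- max(_SEVERITY.get(state, 2) for state in normalized)
    let top := rest.foldl (fun a s => max a (pvSev s)) (pvSev first)
    if top = 4 then "failed"
    else if top = 3 then "running"
    else if top = 1 then "success"
    else if top = 0 then "skipped"
    else first

-- ===== PRECONDITION & SPEC =====
def Spec_status_for_stage_py (states : List String) (out : String) : Prop := out = status_for_stage_py_alt states
instance (states : List String) (out : String) : Decidable (Spec_status_for_stage_py states out) := by unfold Spec_status_for_stage_py; infer_instance

-- ===== CLAIM (what is proved, stated in full; the proofs are below) =====
def Claim_equal_status_for_stage_py : Prop := ∀ (states : List String), Dom_status_for_stage_py states → Spec_status_for_stage_py states (status_for_stage_py states)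

-- ===== LEMMAS AND PROOFS =====

lemma pvSev_spec (s : String) : pvSev s =
    if pvFailedStates.contains s then 4
    else if pvActiveStates.contains s then 3
    else if s = "success" then 1
    else if s = "skipped" then 0
    else 2 := by
  simp only [pvSev, pvSeverity, pvFailedStates, pvActiveStates,
    PySem.Dict.getD_eq_get?_getD, PySem.Dict.get?_mk_cons, List.contains_eq_mem,
    List.mem_cons, List.not_mem_nil, or_false, decide_eq_true_eq]
  split_ifs <;> simp_all [PySem.Dict.get?] <;> simp_all [eq_comm]

lemma pvSev_le4 (s : String) : pvSev s ≤ 4 := by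
  rw [pvSev_spec]; split_ifs <;> norm_num

lemma le_fold (l : List String) : ∀ a : Int, a ≤ l.foldl (fun x s => max x (pvSev s)) a := by
  induction l with
  | nil => intro a; simp
  | cons x xs ih => intro a; exact le_trans (le_max_left _ _) (ih _)

lemma mem_le_fold (l : List String) (s : String) (hs : s ∈ l) :
    ∀ a : Int, pvSev s ≤ l.foldl (fun x t => max x (pvSev t)) a := by
  induction l with
  | nil => cases hs
  | cons x xs ih =>
    intro a
    rcases List.mem_cons.mp hs with h | h
    · subst h; exact le_trans (le_max_right _ _) (le_fold _ _)
    · exact ih h _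

lemma fold_le (l : List String) (b : Int) (hb : ∀ s ∈ l, pvSev s ≤ b) :
    ∀ a : Int, a ≤ b → l.foldl (fun x s => max x (pvSev s)) a ≤ b := by
  induction l with
  | nil => intro a ha; simpa using ha
  | cons x xs ih =>
    intro a ha
    exact ih (fun s hs => hb s (List.mem_cons_of_mem _ hs)) _
      (max_le ha (hb x (List.mem_cons_self)))

-- ===== VERDICT (by name: the statement is the Claim_ definition above) =====
theorem status_for_stage_py_spec : Claim_equal_status_for_stage_py := by
  intro states _
  unfold Spec_status_for_stage_py status_for_stage_py status_for_stage_py_alt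
  cases h : states.filter (fun s => s ≠ "") with
  | nil => rfl
  | cons first rest =>
    simp only
    set top := rest.foldl (fun a s => max a (pvSev s)) (pvSev first) with htop
    have hge : ∀ s ∈ first :: rest, pvSev s ≤ top := by
      intro s hs
      rcases List.mem_cons.mp hs with h' | h'
      · subst h'; exact le_fold _ _
      · exact mem_le_fold _ _ h' _
    have hle : ∀ b : Int, (∀ s ∈ first :: rest, pvSev s ≤ b) → top ≤ b := by
      intro b hb
      exact fold_le _ _ (fun s hs => hb s (List.mem_cons_of_mem _ hs)) _
        (hb first (List.mem_cons_self))
    by_cases h1 : (first :: rest).any (fun s => pvFailedStates.contains s) = true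
    · -- some failed state present: top = 4
      obtain ⟨s, hs, hf⟩ := List.any_eq_true.mp h1
      have h4 : pvSev s = 4 := by rw [pvSev_spec, if_pos hf]
      have ht4 : top = 4 :=
        le_antisymm (hle 4 (fun t _ => pvSev_le4 t)) (h4 ▸ hge s hs)
      rw [if_pos h1, ht4]; norm_num
    · have hnf : ∀ t ∈ first :: rest, pvFailedStates.contains t = false := by
        intro t ht
        cases hcb : pvFailedStates.contains t with
        | false => rfl
        | true => exact absurd (List.any_eq_true.mpr ⟨t, ht, hcb⟩) h1
      by_cases h2 : (first :: rest).any (fun s => pvActiveStates.contains s) = true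
      · -- no failed, some active: top = 3
        obtain ⟨s, hs, ha⟩ := List.any_eq_true.mp h2
        have h3 : pvSev s = 3 := by
          rw [pvSev_spec, if_neg (by rw [hnf s hs]; simp), if_pos ha]
        have hbnd : ∀ t ∈ first :: rest, pvSev t ≤ 3 := by
          intro t ht
          rw [pvSev_spec, if_neg (by rw [hnf t ht]; simp)]
          split_ifs <;> norm_num
        have htop3 : top = 3 := le_antisymm (hle 3 hbnd) (h3 ▸ hge s hs)
        rw [if_neg h1, if_pos h2, htop3]; norm_num
      · -- no failed, no active: severity is decided by success/skipped alone
        have hna : ∀ t ∈ first :: rest, pvActiveStates.contains t = false := by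
          intro t ht
          cases hcb : pvActiveStates.contains t with
          | false => rfl
          | true => exact absurd (List.any_eq_true.mpr ⟨t, ht, hcb⟩) h2
        have hplain : ∀ t ∈ first :: rest, pvSev t =
            (if t = "success" then 1 else if t = "skipped" then 0 else 2) := by
          intro t ht
          rw [pvSev_spec, if_neg (by rw [hnf t ht]; simp),
            if_neg (by rw [hna t ht]; simp)]
        by_cases h3 : ((first :: rest).any (fun s => s == "success")
            && (first :: rest).all (fun s => s == "success" || s == "skipped")) = true
        · -- some success, all success/skipped: top = 1
          rw [Bool.and_eq_true] at h3
          obtain ⟨hany, hall⟩ := h3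
          obtain ⟨s, hs, hsucc⟩ := List.any_eq_true.mp hany
          have hs1 : pvSev s = 1 := by
            rw [hplain s hs, if_pos (by simpa using hsucc)]
          have hbnd : ∀ t ∈ first :: rest, pvSev t ≤ 1 := by
            intro t ht
            have hx := List.all_eq_true.mp hall t ht
            rw [hplain t ht]
            rcases (by simpa using hx : t = "success" ∨ t = "skipped") with h' | h' <;>
              simp [h']
          have htop1 : top = 1 := le_antisymm (hle 1 hbnd) (hs1 ▸ hge s hs)
          rw [if_neg h1, if_neg h2, if_pos (by rw [Bool.and_eq_true]; exact ⟨hany, hall⟩),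
            htop1]
          norm_num
        · by_cases h4 : (first :: rest).all (fun s => s == "skipped") = true
          · -- all skipped: top = 0
            have hbnd : ∀ t ∈ first :: rest, pvSev t ≤ 0 := by
              intro t ht
              have hx := List.all_eq_true.mp h4 t ht
              rw [hplain t ht]
              simp [(by simpa using hx : t = "skipped")]
            have hge0 : (0 : Int) ≤ top := by
              have h5 := hge first (List.mem_cons_self)
              have h0 : (0 : Int) ≤ pvSev first := by
                rw [pvSev_spec]; split_ifs <;> norm_num
              omega
            have htop0 : top = 0 := le_antisymm (hle 0 hbnd) hge0
            rw [if_neg h1, if_neg h2, if_neg h3, if_pos h4, htop0]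
            norm_num
          · -- fallback: top = 2, both return `first`
            have hbnd : ∀ t ∈ first :: rest, pvSev t ≤ 2 := by
              intro t ht
              rw [hplain t ht]; split_ifs <;> norm_num
            have hex : ∃ t ∈ first :: rest, pvSev t = 2 := by
              obtain ⟨t, ht, hnsk⟩ : ∃ t ∈ first :: rest, ¬(t = "skipped") := by
                by_contra hc
                push Not at hc
                exact h4 (List.all_eq_true.mpr fun t ht => by simp [hc t ht])
              by_cases hts : t = "success"
              · have hany : (first :: rest).any (fun s => s == "success") = true :=
                  List.any_eq_true.mpr ⟨t, ht, by simp [hts]⟩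
                have hnall : ¬ (first :: rest).all
                    (fun s => s == "success" || s == "skipped") = true := by
                  intro hc
                  exact h3 (by rw [Bool.and_eq_true]; exact ⟨hany, hc⟩)
                obtain ⟨u, hu, hu2⟩ : ∃ u ∈ first :: rest,
                    ¬(u = "success" ∨ u = "skipped") := by
                  by_contra hc
                  push Not at hc
                  exact hnall (List.all_eq_true.mpr fun u hu => by
                    rcases hc u hu with h' | h' <;> simp [h'])
                push Not at hu2
                refine ⟨u, hu, ?_⟩
                rw [hplain u hu, if_neg hu2.1, if_neg hu2.2]
              · exact ⟨t, ht, by rw [hplain t ht, if_neg hts, if_neg hnsk]⟩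
            obtain ⟨t, ht, ht2⟩ := hex
            have htop2 : top = 2 := le_antisymm (hle 2 hbnd) (ht2 ▸ hge t ht)
            rw [if_neg h1, if_neg h2, if_neg h3, if_neg h4, htop2]
            norm_num
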